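-- pv_equiv track=rewrite | github.com/jonnaliesel/advent-of-code | 2025/day_2_refactored.py | has_repeating_pattern
-- ===== SOURCE A (Python) =====
-- def has_repeating_pattern(number: int, check_all_patterns: bool = False) -> bool:
--     num_str = str(number)
--     max_repetitions = len(num_str) + 1 if check_all_patterns else 3
--
--     for repetitions in range(2, max_repetitions):
--         if len(num_str) % repetitions != 0:
--             continue
--
--         pattern_length = len(num_str) // repetitions
--         pattern = num_str[:pattern_length]
--
--         if pattern * repetitions == num_str:
--             return True
--
--     return False
-- ===== SOURCE B (Python) =====
-- def has_repeating_pattern(number: int, check_all_patterns: bool = False) -> bool: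
--     s = str(number)
--     if check_all_patterns:
--         # classic concatenation-search test for a repeated substring
--         return (s + s).find(s, 1) != len(s)
--     # default: only a doubled pattern is checked
--     half = len(s) // 2
--     return len(s) % 2 == 0 and s[:half] == s[half:]
-- ===== Notes on version B (the rewrite author's own statement) =====
-- stated objective: idiomatic
-- what changed: Replaces the divisor-enumeration loop (try every repetition count, rebuild pattern*r and compare) by the classic concatenation-search test (s+s).find(s,1) != len(s) for the all-patterns case, and by a single halves comparison for the default case.
import Mathlib
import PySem

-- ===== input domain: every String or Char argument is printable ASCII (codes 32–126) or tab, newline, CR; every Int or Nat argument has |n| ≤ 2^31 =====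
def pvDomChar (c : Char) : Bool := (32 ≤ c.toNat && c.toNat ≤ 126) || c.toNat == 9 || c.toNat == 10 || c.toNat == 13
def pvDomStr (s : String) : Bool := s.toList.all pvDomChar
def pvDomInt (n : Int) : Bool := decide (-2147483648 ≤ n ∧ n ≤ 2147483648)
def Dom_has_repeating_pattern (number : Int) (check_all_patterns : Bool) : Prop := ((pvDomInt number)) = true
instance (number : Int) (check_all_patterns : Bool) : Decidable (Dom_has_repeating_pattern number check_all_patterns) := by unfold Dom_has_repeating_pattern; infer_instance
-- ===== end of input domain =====

-- B replaces A's divisor-enumeration loop by the classic concatenation-search test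
-- (s+s).find(s,1) != len(s) for the all-patterns case and a single halves comparison
-- for the default case (idiomatic; equal return values are proved).

-- ===== PORT A =====
-- the for-loop of A with its early `return True` / `continue`
def hrpLoopA (s : List Char) : List Int → Bool
  | [] => false
  | r :: rs =>
    if PySem.Int.mod (PySem.List.len s) r ≠ 0 then hrpLoopA s rs
    else
      if PySem.List.pyRepeat (PySem.List.slice s none (some (PySem.Int.floordiv (PySem.List.len s) r))) r == s then true
      else hrpLoopA s rs

def has_repeating_pattern (number : Int) (check_all_patterns : Bool) : Bool :=
  let numStr := PySem.Int.toChars number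
  let maxRepetitions : Int := if check_all_patterns then PySem.List.len numStr + 1 else 3
  hrpLoopA numStr (PySem.List.pyRange 2 maxRepetitions 1)

-- ===== PORT B =====
def has_repeating_pattern_alt (number : Int) (check_all_patterns : Bool) : Bool :=
  let s := PySem.Int.toChars number
  if check_all_patterns then
    PySem.Chars.findFrom (s ++ s) s 1 none != PySem.List.len s
  else
    let half := PySem.Int.floordiv (PySem.List.len s) 2
    (PySem.Int.mod (PySem.List.len s) 2 == 0) &&
      (PySem.List.slice s none (some half) == PySem.List.slice s (some half) none)

-- ===== PRECONDITION & SPEC =====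
def Spec_has_repeating_pattern (number : Int) (check_all_patterns : Bool) (out : Bool) : Prop := out = has_repeating_pattern_alt number check_all_patterns
instance (number : Int) (check_all_patterns : Bool) (out : Bool) : Decidable (Spec_has_repeating_pattern number check_all_patterns out) := by unfold Spec_has_repeating_pattern; infer_instance

-- ===== CLAIM (what is proved, stated in full; the proofs are below) =====
def Claim_equal_has_repeating_pattern : Prop := ∀ (number : Int) (check_all_patterns : Bool), Dom_has_repeating_pattern number check_all_patterns → Spec_has_repeating_pattern number check_all_patterns (has_repeating_pattern number check_all_patterns)

-- ===== LEMMAS AND PROOFS =====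

-- str(n) is never empty
theorem toDigitsCore_ne_nil (b : Nat) : ∀ (f n : Nat) (ds : List Char), f ≠ 0 ∨ ds ≠ [] → Nat.toDigitsCore b f n ds ≠ [] := by
  intro f
  induction f with
  | zero => intro n ds h; simp [Nat.toDigitsCore]; tauto
  | succ f ih =>
    intro n ds _
    simp only [Nat.toDigitsCore]
    split
    · simp
    · exact ih _ _ (Or.inr (by simp))

theorem toChars_ne_nil (n : Int) : PySem.Int.toChars n ≠ [] := by
  unfold PySem.Int.toChars Nat.toDigits
  split
  · simp
  · exact toDigitsCore_ne_nil 10 _ _ [] (Or.inl (Nat.succ_ne_zero _))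

-- A's loop is an existence test over the iterated list
theorem hrpLoopA_eq_any (s : List Char) (rs : List Int) :
    hrpLoopA s rs = rs.any (fun r =>
      (PySem.Int.mod (PySem.List.len s) r == 0) &&
      (PySem.List.pyRepeat (PySem.List.slice s none (some (PySem.Int.floordiv (PySem.List.len s) r))) r == s)) := by
  induction rs with
  | nil => rfl
  | cons r rs ih =>
    simp only [hrpLoopA, List.any_cons]
    by_cases h : PySem.Int.mod (PySem.List.len s) r = 0
    · have hb : (PySem.Int.mod (PySem.List.len s) r == 0) = true := by simpa using h
      rw [if_neg (not_not_intro h), hb, Bool.true_and]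
      rcases Bool.eq_false_or_eq_true
          (PySem.List.pyRepeat (PySem.List.slice s none (some (PySem.Int.floordiv (PySem.List.len s) r))) r == s) with h2 | h2
      · rw [if_pos h2, h2, Bool.true_or]
      · rw [if_neg (by simpa using h2), h2, Bool.false_or]
        exact ih
    · have hb : (PySem.Int.mod (PySem.List.len s) r == 0) = false := by simpa using h
      rw [if_pos h, hb, Bool.false_and, Bool.false_or]
      exact ih

-- membership in range(a, b)
theorem mem_pyRange_one (a b r : Int) : r ∈ PySem.List.pyRange a b 1 ↔ a ≤ r ∧ r < b := by
  simp only [PySem.List.pyRange, if_neg (by norm_num : (1:Int) ≠ 0), if_pos (by norm_num : (0:Int) < 1)]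
  have hba : ((b - a + 1 - 1) / 1 : Int) = b - a := by rw [Int.ediv_one]; ring
  split
  · rename_i h
    rw [hba]
    simp only [List.mem_map, List.mem_range]
    constructor
    · rintro ⟨k, hk, rfl⟩; omega
    · rintro ⟨h1, h2⟩
      exact ⟨(r - a).toNat, by omega, by omega⟩
  · rename_i h
    simp only [List.range_zero, List.map_nil, List.not_mem_nil, false_iff]
    omega

-- a block rotation of a power is the power itself
theorem replicate_flatten_comm {α : Type} (m : Nat) (t : List α) :
    (List.replicate m t).flatten ++ t = t ++ (List.replicate m t).flatten := by
  induction m with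
  | zero => simp
  | succ m ih => simp only [List.replicate_succ, List.flatten_cons, List.append_assoc, ih]

-- commuting words are powers of the shorter one
theorem comm_pow {α : Type} : ∀ (m : Nat) (v t : List α), v.length = m →
    t ++ v = v ++ t → t ≠ [] → t.length ∣ v.length →
    v = (List.replicate (v.length / t.length) t).flatten := by
  intro m
  induction m using Nat.strong_induction_on with
  | _ m ih =>
    intro v t hm hcomm hne hdvd
    rcases Nat.eq_zero_or_pos v.length with hv | hv
    · have : v = [] := List.eq_nil_of_length_eq_zero hv
      simp [this]
    · have htpos : 0 < t.length := List.length_pos_iff.mpr hne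
      have hle : t.length ≤ v.length := Nat.le_of_dvd hv hdvd
      have htake : v.take t.length = t := by
        have h1 : (t ++ v).take t.length = t := by
          simpa using List.take_append_of_le_length (le_refl t.length)
        have h2 : (v ++ t).take t.length = v.take t.length :=
          List.take_append_of_le_length hle
        rw [hcomm] at h1
        rw [h2] at h1
        exact h1
      have hv_split : v = t ++ v.drop t.length := by
        conv_lhs => rw [← List.take_append_drop t.length v, htake]
      set w := v.drop t.length with hw
      have hwlen : w.length = v.length - t.length := by simp [hw]
      have hcomm' : t ++ w = w ++ t := by
        have : t ++ (t ++ w) = t ++ (w ++ t) := by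
          calc t ++ (t ++ w) = t ++ v := by rw [← hv_split]
            _ = v ++ t := hcomm
            _ = (t ++ w) ++ t := by rw [hv_split]
            _ = t ++ (w ++ t) := by simp [List.append_assoc]
        exact List.append_cancel_left this
      have hdvd' : t.length ∣ w.length := by
        rw [hwlen]; exact Nat.dvd_sub hdvd dvd_rfl
      have hlt : w.length < m := by omega
      have hrec := ih w.length hlt w t rfl hcomm' hne hdvd'
      have hq : v.length / t.length = w.length / t.length + 1 := by
        have hsum : v.length = w.length + t.length := by omega
        rw [hsum, Nat.add_div_right _ htpos]
      rw [hq, List.replicate_succ, List.flatten_cons, ← hrec, ← hv_split]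

-- rotate as an iterate of rotate 1
theorem rotate_iterate {α : Type} : ∀ (m : Nat) (l : List α),
    (fun l : List α => l.rotate 1)^[m] l = l.rotate m := by
  intro m
  induction m with
  | zero => intro l; simp
  | succ m ih =>
    intro l
    rw [Function.iterate_succ_apply', ih, List.rotate_rotate]

-- a word with period g (g ∣ length) is a power of its g-prefix
theorem period_pow (s : List Char) (g : Nat) (hg : 0 < g) (hle : g ≤ s.length)
    (hdvd : g ∣ s.length) (hrot : s.drop g ++ s.take g = s) :
    s = (List.replicate (s.length / g) (s.take g)).flatten := by
  have htlen : (s.take g).length = g := by simp [hle]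
  have hne : s.take g ≠ [] := by
    intro h; rw [h] at htlen; simp at htlen; omega
  have hcomm : s.take g ++ s.drop g = s.drop g ++ s.take g := by
    rw [List.take_append_drop, hrot]
  have hdvd' : (s.take g).length ∣ (s.drop g).length := by
    rw [htlen, List.length_drop]; exact Nat.dvd_sub hdvd dvd_rfl
  have hrec := comm_pow (s.drop g).length (s.drop g) (s.take g) rfl hcomm hne hdvd'
  have hq : s.length / g = (s.drop g).length / (s.take g).length + 1 := by
    rw [htlen, List.length_drop]
    have hsum : s.length = (s.length - g) + g := by omega
    conv_lhs => rw [hsum]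
    rw [Nat.add_div_right _ hg]
  rw [hq, List.replicate_succ, List.flatten_cons, ← hrec, List.take_append_drop]

-- the heart: some nontrivial cyclic shift fixes s  ↔  s is a nontrivial power
theorem rot_iff_pow (s : List Char) (hs : s ≠ []) :
    (∃ k, 1 ≤ k ∧ k < s.length ∧ s.drop k ++ s.take k = s) ↔
    (∃ r, 2 ≤ r ∧ r ≤ s.length ∧ r ∣ s.length ∧
      (List.replicate r (s.take (s.length / r))).flatten = s) := by
  have hn : 0 < s.length := List.length_pos_iff.mpr hs
  constructor
  · rintro ⟨k, hk1, hk2, hrot⟩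
    set g := k.gcd s.length with hgdef
    have hgk : g ∣ k := Nat.gcd_dvd_left _ _
    have hgn : g ∣ s.length := Nat.gcd_dvd_right _ _
    have hgpos : 0 < g := Nat.gcd_pos_of_pos_left _ (by omega)
    have hgk' : g ≤ k := Nat.le_of_dvd (by omega) hgk
    have hper : Function.IsPeriodicPt (fun l : List Char => l.rotate 1) g s := by
      have h1 : Function.IsPeriodicPt (fun l : List Char => l.rotate 1) k s := by
        unfold Function.IsPeriodicPt Function.IsFixedPt
        rw [rotate_iterate, List.rotate_eq_drop_append_take (le_of_lt hk2), hrot]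
      have h2 : Function.IsPeriodicPt (fun l : List Char => l.rotate 1) s.length s := by
        unfold Function.IsPeriodicPt Function.IsFixedPt
        rw [rotate_iterate, List.rotate_length]
      exact h1.gcd h2
    have hgle : g ≤ s.length := Nat.le_of_dvd hn hgn
    have hrotg : s.drop g ++ s.take g = s := by
      have := hper
      unfold Function.IsPeriodicPt Function.IsFixedPt at this
      rw [rotate_iterate, List.rotate_eq_drop_append_take hgle] at this
      exact this
    have hpow := period_pow s g hgpos hgle hgn hrotg
    refine ⟨s.length / g, ?_, ?_, ?_, ?_⟩
    · rcases hgn with ⟨c, hc⟩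
      have hc2 : 2 ≤ c := by
        rcases Nat.lt_or_ge c 2 with h | h
        · interval_cases c <;> omega
        · exact h
      rw [hc, Nat.mul_div_cancel_left _ hgpos]
      exact hc2
    · exact Nat.div_le_self _ _
    · exact Nat.div_dvd_of_dvd hgn
    · rw [Nat.div_div_self hgn (by omega)]
      exact hpow.symm
  · rintro ⟨r, hr2, hrn, hrdvd, hEq⟩
    set p := s.length / r with hpdef
    set t := s.take p with htdef
    have hpn : p ≤ s.length := Nat.div_le_self _ _
    have htlen : t.length = p := by simp [htdef, hpn]
    have hnp : s.length = r * p := by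
      rw [hpdef, Nat.mul_div_cancel' hrdvd]
    have hp1 : 1 ≤ p := by
      have : r ≤ r * p := by omega
      nlinarith
    have hplt : p < s.length := by nlinarith
    have hsplit : s = t ++ (List.replicate (r - 1) t).flatten := by
      conv_lhs => rw [← hEq]
      obtain ⟨r', rfl⟩ : ∃ r', r = r' + 1 := ⟨r - 1, by omega⟩
      simp [List.replicate_succ]
    refine ⟨p, hp1, hplt, ?_⟩
    have hdropp : s.drop p = (List.replicate (r - 1) t).flatten := by
      conv_lhs => rw [hsplit]
      rw [List.drop_append_of_le_length (by omega), ← htlen, List.drop_length,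
        List.nil_append]
    have htakep : s.take p = t := by
      conv_lhs => rw [hsplit]
      rw [List.take_append_of_le_length (by omega), ← htlen, List.take_length]
    rw [hdropp, htakep, replicate_flatten_comm, ← hsplit]

theorem floordiv_natCast (m k : Nat) : PySem.Int.floordiv (m : Int) (k : Int) = ((m / k : Nat) : Int) := by
  unfold PySem.Int.floordiv
  rw [Int.fdiv_eq_ediv]
  simp

theorem pyRepeat_natCast (t : List Char) (r : Nat) :
    PySem.List.pyRepeat t (r : Int) = (List.replicate r t).flatten := by
  simp [PySem.List.pyRepeat]

-- one loop-body test of A, on a Nat repetition count, as a proposition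
theorem bodyA_iff (s : List Char) (rr : Nat) :
    ((PySem.Int.mod (PySem.List.len s) (rr : Int) == 0) &&
      (PySem.List.pyRepeat (PySem.List.slice s none (some (PySem.Int.floordiv (PySem.List.len s) (rr : Int)))) (rr : Int) == s)) = true ↔
    (rr ∣ s.length ∧ (List.replicate rr (s.take (s.length / rr))).flatten = s) := by
  rw [Bool.and_eq_true, beq_iff_eq, beq_iff_eq, PySem.List.len_eq,
    floordiv_natCast, PySem.List.slice_to_natCast, pyRepeat_natCast,
    PySem.Int.mod_eq_zero_iff_dvd, Int.natCast_dvd_natCast]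

-- characterisation of A with check_all_patterns = true
theorem portA_true_iff (number : Int) :
    has_repeating_pattern number true = true ↔
    (∃ r, 2 ≤ r ∧ r ≤ (PySem.Int.toChars number).length ∧ r ∣ (PySem.Int.toChars number).length ∧
      (List.replicate r ((PySem.Int.toChars number).take ((PySem.Int.toChars number).length / r))).flatten = PySem.Int.toChars number) := by
  unfold has_repeating_pattern
  simp only [if_true, hrpLoopA_eq_any, List.any_eq_true]
  set s := PySem.Int.toChars number with hsdef
  constructor
  · rintro ⟨r, hmem, hcond⟩
    rw [mem_pyRange_one, PySem.List.len_eq] at hmem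
    obtain ⟨hr2, hrlt⟩ := hmem
    lift r to Nat using (by omega : (0:Int) ≤ r) with rr
    rw [bodyA_iff] at hcond
    exact ⟨rr, by exact_mod_cast hr2, by omega, hcond.1, hcond.2⟩
  · rintro ⟨rr, hr2, hrn, hdvd, heq⟩
    refine ⟨(rr : Int), ?_, ?_⟩
    · rw [mem_pyRange_one, PySem.List.len_eq]
      constructor <;> [exact_mod_cast hr2; omega]
    · rw [bodyA_iff]
      exact ⟨hdvd, heq⟩

-- a prefix of the doubled word at offset k is exactly a k-rotation fixing s
theorem prefix_drop_double_iff (s : List Char) (k : Nat) (hk : k ≤ s.length) :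
    s <+: (s ++ s).drop k ↔ s.drop k ++ s.take k = s := by
  rw [List.drop_append_of_le_length hk, List.prefix_iff_eq_take, List.take_append]
  have h1 : (s.drop k).take s.length = s.drop k := List.take_of_length_le (by simp)
  have h2 : s.length - (s.drop k).length = k := by simp; omega
  rw [h1, h2]
  exact eq_comm

-- characterisation of B with check_all_patterns = true
theorem portB_true_iff (number : Int) :
    has_repeating_pattern_alt number true = true ↔
    (∃ k, 1 ≤ k ∧ k < (PySem.Int.toChars number).length ∧
      (PySem.Int.toChars number).drop k ++ (PySem.Int.toChars number).take k = PySem.Int.toChars number) := by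
  unfold has_repeating_pattern_alt
  simp only [if_true]
  set s := PySem.Int.toChars number with hsdef
  have hs : s ≠ [] := toChars_ne_nil number
  have hn : 0 < s.length := List.length_pos_iff.mpr hs
  have hf := PySem.Chars.findFrom_natCast (s ++ s) s 1 (by simp; omega)
  rw [Nat.cast_one] at hf
  have hdrop : (s ++ s).drop 1 = s.drop 1 ++ s := List.drop_append_of_le_length (by omega)
  have hinf : s <:+: (s ++ s).drop 1 := by
    rw [hdrop]; exact (List.suffix_append _ _).isInfix
  have hne : PySem.Chars.find ((s ++ s).drop 1) s ≠ -1 :=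
    (PySem.Chars.find_ne_neg_one_iff _ _).mpr hinf
  rw [if_neg hne] at hf
  have hge : 0 ≤ PySem.Chars.find ((s ++ s).drop 1) s := by
    have := PySem.Chars.neg_one_le_find ((s ++ s).drop 1) s
    omega
  set j := (PySem.Chars.find ((s ++ s).drop 1) s).toNat with hjdef
  have hjv : PySem.Chars.find ((s ++ s).drop 1) s = (j : Int) := (Int.toNat_of_nonneg hge).symm
  obtain ⟨hpre, hmin⟩ := PySem.Chars.find_spec hge
  rw [List.drop_drop] at hpre
  have hjle : j ≤ s.length - 1 := by
    by_contra hcon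
    refine hmin (s.length - 1) (by omega) ?_
    rw [List.drop_drop]
    have he : 1 + (s.length - 1) = s.length := by omega
    rw [he, List.drop_left]
  rw [hf, hjv, bne_iff_ne, PySem.List.len_eq]
  constructor
  · intro hne2
    refine ⟨j + 1, by omega, by omega, ?_⟩
    rw [← prefix_drop_double_iff s (j + 1) (by omega)]
    have he : 1 + j = j + 1 := by omega
    rw [← he]
    exact hpre
  · rintro ⟨k, hk1, hk2, hrot⟩
    have hpk : s <+: (s ++ s).drop k := (prefix_drop_double_iff s k (by omega)).mpr hrot
    have hjk : ¬ (k - 1 < j) := by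
      intro hlt
      refine hmin (k - 1) hlt ?_
      rw [List.drop_drop]
      have he : 1 + (k - 1) = k := by omega
      rw [he]
      exact hpk
    omega

-- the default case: A's single r = 2 test is B's halves comparison
theorem false_case (number : Int) :
    has_repeating_pattern number false = has_repeating_pattern_alt number false := by
  have hr : PySem.List.pyRange 2 3 1 = [2] := by decide
  unfold has_repeating_pattern has_repeating_pattern_alt
  simp only [Bool.false_eq_true, if_false, hr]
  set s := PySem.Int.toChars number with hsdef
  simp only [hrpLoopA]
  by_cases hm : PySem.Int.mod (PySem.List.len s) 2 = 0
  · have hb : (PySem.Int.mod (PySem.List.len s) 2 == 0) = true := by simpa using hm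
    rw [if_neg (not_not_intro hm), hb, Bool.true_and]
    have hfd : PySem.Int.floordiv (PySem.List.len s) 2 = ((s.length / 2 : Nat) : Int) := by
      rw [PySem.List.len_eq]
      exact_mod_cast floordiv_natCast s.length 2
    have hpr : PySem.List.pyRepeat (s.take (s.length / 2)) (2 : Int) =
        s.take (s.length / 2) ++ s.take (s.length / 2) := by
      have h2 := pyRepeat_natCast (s.take (s.length / 2)) 2
      rw [show ((2 : Nat) : Int) = 2 by norm_num] at h2
      rw [h2]
      simp
    have hbb : (PySem.List.pyRepeat (PySem.List.slice s none (some (PySem.Int.floordiv (PySem.List.len s) 2))) 2 == s) =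
        (s.take (s.length / 2) == s.drop (s.length / 2)) := by
      rw [hfd, PySem.List.slice_to_natCast, hpr, Bool.eq_iff_iff, beq_iff_eq, beq_iff_eq]
      constructor
      · intro h
        have hsplit : s.take (s.length / 2) ++ s.drop (s.length / 2) = s := List.take_append_drop _ _
        exact List.append_cancel_left (h.trans hsplit.symm)
      · intro h
        conv_rhs => rw [← List.take_append_drop (s.length / 2) s]
        rw [h]
    rw [hfd, PySem.List.slice_to_natCast, PySem.List.slice_from_natCast]
    rw [hfd, PySem.List.slice_to_natCast] at hbb
    rcases Bool.eq_false_or_eq_true (s.take (s.length / 2) == s.drop (s.length / 2)) with h | h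
    · rw [hbb] at *
      simp [h]
    · rw [hbb]
      simp [h]
  · have hb : (PySem.Int.mod (PySem.List.len s) 2 == 0) = false := by simpa using hm
    rw [if_pos hm, hb, Bool.false_and]

-- ===== VERDICT (by name: the statement is the Claim_ definition above) =====
theorem has_repeating_pattern_spec : Claim_equal_has_repeating_pattern := by
  intro number cap _
  unfold Spec_has_repeating_pattern
  cases cap
  · exact false_case number
  · rw [Bool.eq_iff_iff, portA_true_iff, portB_true_iff,
      rot_iff_pow _ (toChars_ne_nil number)]
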